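-- pv_equiv track=rewrite | github.com/REM-Infotech/CrawJUD-Bots | bot/head/__init__.py | group_date_all
-- ===== SOURCE A (Python) =====
-- def group_date_all(data: dict[str, dict[str, str]]) -> dict[str, str]:
--
--     record = {}
--     for vara, dates in data.items():
--         for date, entries in dates.items():
--             for entry in entries:
--                 record = {'Data': date}
--                 record.update(entry)
--
--     return record
-- ===== SOURCE B (Python) =====
-- def group_date_all(data: dict[str, dict[str, str]]) -> dict[str, str]:
--     # Reverse short-circuit search: find the last non-empty entries list and
--     # merge its last entry onto {'Data': date}; {} if none exists.
--     for dates in reversed(data.values()):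
--         for date, entries in reversed(dates.items()):
--             if entries:
--                 record = {'Data': date}
--                 record.update(entries[-1])
--                 return record
--     return {}
-- ===== Notes on version B (the rewrite author's own statement) =====
-- stated objective: alternative
-- what changed: Replaces A's exhaustive triple loop (which overwrites record on every entry) by a reverse short-circuit search that returns the merge of the last non-empty entries list's last entry immediately.
import Mathlib
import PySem

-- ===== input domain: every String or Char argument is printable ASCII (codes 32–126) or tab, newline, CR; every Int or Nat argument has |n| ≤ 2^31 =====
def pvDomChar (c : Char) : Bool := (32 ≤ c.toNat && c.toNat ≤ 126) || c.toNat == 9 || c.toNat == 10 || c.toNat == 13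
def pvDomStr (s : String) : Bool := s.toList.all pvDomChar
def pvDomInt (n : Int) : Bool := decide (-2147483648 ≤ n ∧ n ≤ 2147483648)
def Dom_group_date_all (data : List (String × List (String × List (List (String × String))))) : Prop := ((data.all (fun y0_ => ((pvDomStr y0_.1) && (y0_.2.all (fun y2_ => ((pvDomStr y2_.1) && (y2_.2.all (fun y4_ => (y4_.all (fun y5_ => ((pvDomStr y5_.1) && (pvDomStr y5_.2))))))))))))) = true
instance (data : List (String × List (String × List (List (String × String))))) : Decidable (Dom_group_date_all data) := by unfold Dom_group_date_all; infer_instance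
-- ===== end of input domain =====

-- B replaces A's exhaustive overwrite-all triple loop by a reverse short-circuit
-- search for the last non-empty entries list (objective: alternative/simpler).

-- record = {'Data': date}; record.update(entry)  (shared by both ports, both Pythons contain this line verbatim)
def pvMerge (date : String) (entry : List (String × String)) : PySem.Dict String String :=
  PySem.Dict.update (PySem.Dict.ofList [("Data", date)]) entry

-- ===== PORT A =====
def group_date_all (data : List (String × List (String × List (List (String × String))))) : List (String × String) :=
  (data.foldl (fun record p =>
      p.2.foldl (fun record q =>
          q.2.foldl (fun _ entry => pvMerge q.1 entry) record)
        record)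
    (PySem.Dict.empty : PySem.Dict String String)).items

-- ===== PORT B =====
-- inner reverse loop: first date (scanning the reversed list) with a non-empty entries list
def pvFindDate : List (String × List (List (String × String))) → Option (PySem.Dict String String)
  | [] => none
  | (date, entries) :: rest =>
      match entries.getLast? with
      | some entry => some (pvMerge date entry)
      | none => pvFindDate rest

-- outer reverse loop over the varas
def pvFindVara : List (String × List (String × List (List (String × String)))) → PySem.Dict String String
  | [] => PySem.Dict.empty
  | (_, dates) :: rest =>
      match pvFindDate dates.reverse with
      | some r => r
      | none => pvFindVara rest

def group_date_all_alt (data : List (String × List (String × List (List (String × String))))) : List (String × String) :=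
  (pvFindVara data.reverse).items

-- ===== PRECONDITION & SPEC =====
def Spec_group_date_all (data : List (String × List (String × List (List (String × String))))) (out : List (String × String)) : Prop := out = group_date_all_alt data
instance (data : List (String × List (String × List (List (String × String))))) (out : List (String × String)) : Decidable (Spec_group_date_all data out) := by unfold Spec_group_date_all; infer_instance

-- ===== CLAIM (what is proved, stated in full; the proofs are below) =====
def Claim_equal_group_date_all : Prop := ∀ (data : List (String × List (String × List (List (String × String))))), Dom_group_date_all data → Spec_group_date_all data (group_date_all data)

-- ===== LEMMAS AND PROOFS =====

-- the innermost A loop only keeps its last iteration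
theorem pv_fold_last {α : Type} (d : String) (l : List (List (String × String))) (r : α)
    (f : String → List (String × String) → α) :
    l.foldl (fun _ e => f d e) r = ((l.getLast?.map (f d)).getD r) := by
  induction l generalizing r with
  | nil => rfl
  | cons a t ih =>
      simp only [List.foldl_cons, ih]
      cases h : t.getLast? with
      | none =>
          have : t = [] := List.getLast?_eq_none_iff.mp h
          subst this; rfl
      | some b =>
          simp [List.getLast?_cons, h]

-- a fold that either replaces or keeps its accumulator equals a reverse findSome?
theorem pv_fold_findSome {α β : Type} (h : α → Option β) (l : List α) (r : β) :
    l.foldl (fun r x => (h x).getD r) r = (l.reverse.findSome? h).getD r := by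
  induction l generalizing r with
  | nil => rfl
  | cons a t ih =>
      simp only [List.foldl_cons, ih, List.reverse_cons, List.findSome?_append]
      cases ht : t.reverse.findSome? h <;> simp

theorem pvFindDate_eq (l : List (String × List (List (String × String)))) :
    pvFindDate l = l.findSome? (fun q => q.2.getLast?.map (pvMerge q.1)) := by
  induction l with
  | nil => rfl
  | cons a t ih =>
      obtain ⟨date, entries⟩ := a
      simp only [pvFindDate, List.findSome?]
      cases entries.getLast? <;> simp [ih, Option.map]

theorem pvFindVara_eq (l : List (String × List (String × List (List (String × String))))) :
    pvFindVara l = ((l.findSome? (fun p => pvFindDate p.2.reverse)).getD PySem.Dict.empty) := by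
  induction l with
  | nil => rfl
  | cons a t ih =>
      simp only [pvFindVara, List.findSome?]
      cases h : pvFindDate a.2.reverse <;> simp [ih]

-- ===== VERDICT (by name: the statement is the Claim_ definition above) =====
theorem group_date_all_spec : Claim_equal_group_date_all := by
  intro data _
  show group_date_all data = group_date_all_alt data
  unfold group_date_all group_date_all_alt
  congr 1
  rw [pvFindVara_eq]
  have hinner : (fun (record : PySem.Dict String String) (q : String × List (List (String × String))) =>
      q.2.foldl (fun _ entry => pvMerge q.1 entry) record)
      = fun record q => ((q.2.getLast?.map (pvMerge q.1)).getD record) := by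
    funext record q
    exact pv_fold_last q.1 q.2 record pvMerge
  have houter : (fun (record : PySem.Dict String String) (p : String × List (String × List (List (String × String)))) =>
      p.2.foldl (fun record q => q.2.foldl (fun _ entry => pvMerge q.1 entry) record) record)
      = fun record p => ((pvFindDate p.2.reverse).getD record) := by
    funext record p
    rw [hinner, pv_fold_findSome, pvFindDate_eq]
  rw [houter, pv_fold_findSome]
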